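-- pv_equiv track=rewrite | github.com/desaxce/euler | src/pb612.py | Rpc
-- ===== SOURCE A (Python) =====
-- def Rpc(S, k):
-- 	N = 10 ** k
-- 	result = 0
-- 	for p in range(1, N):
-- 		digits = [int(d) for d in str(p)]
-- 		if set(digits) == set(S):
-- 			#print (digits)
-- 			#print (S)
-- 			#print (p)
-- 			result += 1
-- 	return result
-- ===== SOURCE B (Python) =====
-- def Rpc(S, k):
-- 	# Inclusion-exclusion over subsets of the digit set T = set(S):
-- 	# numbers in [1, 10**k) with digit set exactly T, counted length by length.
-- 	T = sorted(set(S))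
-- 	if any(d < 0 or d > 9 for d in T):
-- 		return 0
-- 	subsets = [[]]
-- 	for d in T:
-- 		subsets = subsets + [u + [d] for u in subsets]
-- 	t = len(T)
-- 	total = 0
-- 	for U in subsets:
-- 		u = len(U)
-- 		a = u - (1 if 0 in U else 0)
-- 		sign = (-1) ** (t - u)
-- 		geo = 0
-- 		for L in range(1, k + 1):
-- 			geo = geo + u ** (L - 1)
-- 		total = total + (sign * a) * geo
-- 	return total
-- ===== Notes on version B (the rewrite author's own statement) =====
-- stated objective: faster
-- what changed: Replaces the brute-force scan of every number below 10^k (string-converting each) with inclusion-exclusion over the subsets of the digit set T = set(S), summing geometric counts of length-L strings with nonzero lead digit; intended as faster (O(k*2^|T|) vs O(10^k*k)): on a timing run's inputs A times out where B still answers instantly, though at the small sizes both finish the measured ratio varies (1.45x-4.92x), so a timing run did not always confirm it.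
import Mathlib
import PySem

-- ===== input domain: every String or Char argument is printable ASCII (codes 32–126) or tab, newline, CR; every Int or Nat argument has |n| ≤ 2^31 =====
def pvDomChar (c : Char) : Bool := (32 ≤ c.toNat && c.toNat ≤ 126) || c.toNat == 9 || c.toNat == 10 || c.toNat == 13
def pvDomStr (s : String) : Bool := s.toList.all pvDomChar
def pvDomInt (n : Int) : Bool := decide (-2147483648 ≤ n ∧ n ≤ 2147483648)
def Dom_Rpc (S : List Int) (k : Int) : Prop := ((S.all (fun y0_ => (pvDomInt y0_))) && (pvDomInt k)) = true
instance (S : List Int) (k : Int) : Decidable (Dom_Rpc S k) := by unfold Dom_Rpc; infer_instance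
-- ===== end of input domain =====

-- B replaces A's brute-force scan of all numbers below 10^k by inclusion-exclusion over
-- subsets of the digit set; intended as faster (on a timing run's inputs A times out
-- where B answers instantly; at small sizes where both finish the measured ratio varies).


-- ===== PORT A =====
def Rpc (S : List Int) (k : Int) : Int :=
  -- N = 10 ** k : exact for k ≥ 0 (Pre_Rpc); for k < 0 Python's 10**k is a float and range raises
  let N : Int := 10 ^ k.toNat
  (PySem.List.pyRange 1 N 1).foldl
    (fun result p =>
      -- digits = [int(d) for d in str(p)] : every char of str(p) for p ≥ 1 is a digit,
      -- so int(d) never raises; .getD 0 only totalizes the unreachable none case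
      let digits := (PySem.Int.toChars p).map (fun c => (PySem.Int.ofChars? [c]).getD 0)
      if PySem.Set.equal (PySem.Set.ofList digits) (PySem.Set.ofList S) then result + 1
      else result)
    0

-- ===== PORT B =====
def Rpc_alt (S : List Int) (k : Int) : Int :=
  let T := PySem.List.sorted (PySem.Set.ofList S) (fun x => x) false
  if T.any (fun d => decide (d < 0) || decide (9 < d)) then 0
  else
    let subsets := T.foldl (fun subs d => subs ++ subs.map (fun u => u ++ [d])) ([[]] : List (List Int))
    let t := T.length
    subsets.foldl
      (fun (total : Int) (U : List Int) =>
        let u : Nat := U.length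
        let a : Int := (u : Int) - (if (0 : Int) ∈ U then 1 else 0)
        let sign : Int := (-1) ^ (t - u)
        let geo := (PySem.List.pyRange 1 (k + 1) 1).foldl (fun g L => g + (u : Int) ^ ((L - 1).toNat)) 0
        total + (sign * a) * geo)
      0

-- ===== PRECONDITION & SPEC =====
-- Pre_ excludes only k < 0, where Python's A raises TypeError (range bound 10**k is a float).
def Pre_Rpc (S : List Int) (k : Int) : Prop := 0 ≤ k
instance (S : List Int) (k : Int) : Decidable (Pre_Rpc S k) := by unfold Pre_Rpc; infer_instance
def pvWitness_Rpc : List Int × Int := ([1, 2], 1)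

def Spec_Rpc (S : List Int) (k : Int) (out : Int) : Prop := out = Rpc_alt S k
instance (S : List Int) (k : Int) (out : Int) : Decidable (Spec_Rpc S k out) := by unfold Spec_Rpc; infer_instance

-- ===== CLAIM (what is proved, stated in full; the proofs are below) =====
def Claim_equal_Rpc : Prop := ∀ (S : List Int) (k : Int), Dom_Rpc S k → Pre_Rpc S k → Spec_Rpc S k (Rpc S k)

-- ===== LEMMAS AND PROOFS =====

-- pvDS m : the set of decimal digits of m (as integers)
def pvDS (m : ℕ) : Finset ℤ := ((Nat.digits 10 m).map (fun d : ℕ => (d : ℤ))).toFinset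
-- pvE n T : how many m in [1, 10^n) have digit set exactly T
def pvE (n : ℕ) (T : Finset ℤ) : ℕ := ((Finset.Ico 1 (10 ^ n)).filter (fun m => pvDS m = T)).card
-- pvW n U : how many m in [1, 10^n) have all digits in U
def pvW (n : ℕ) (U : Finset ℤ) : ℕ := ((Finset.Ico 1 (10 ^ n)).filter (fun m => pvDS m ⊆ U)).card
-- pvGeo k u : the inner loop of B, sum over L = 1..k of u^(L-1)
def pvGeo (k : ℤ) (u : ℕ) : ℤ :=
  (PySem.List.pyRange 1 (k + 1) 1).foldl (fun g L => g + (u : Int) ^ ((L - 1).toNat)) 0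

lemma pv_toDigitsCore_eq (fuel : ℕ) : ∀ (m : ℕ) (acc : List Char), 0 < m → m ≤ fuel →
    Nat.toDigitsCore 10 fuel m acc = ((Nat.digits 10 m).map Nat.digitChar).reverse ++ acc := by
  induction fuel with
  | zero => intro m acc h1 h2; omega
  | succ fuel ih =>
    intro m acc h1 h2
    rw [Nat.digits_def' (by norm_num : 1 < 10) h1]
    simp only [Nat.toDigitsCore]
    by_cases h : m / 10 = 0
    · simp [h]
    · have hlt : m / 10 < m := Nat.div_lt_self h1 (by norm_num)
      rw [if_neg h, ih (m / 10) _ (Nat.pos_of_ne_zero h) (by omega)]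
      simp

lemma pv_toChars_pos (p : ℤ) (h : 0 < p) :
    PySem.Int.toChars p = ((Nat.digits 10 p.toNat).map Nat.digitChar).reverse := by
  have hn : ¬ p < 0 := by omega
  simp only [PySem.Int.toChars, if_neg hn]
  show Nat.toDigitsCore 10 (p.toNat + 1) p.toNat [] = _
  rw [pv_toDigitsCore_eq (p.toNat + 1) p.toNat [] (by omega) (by omega)]
  simp

lemma pv_ofChars_digitChar (d : ℕ) (h : d < 10) :
    (PySem.Int.ofChars? [Nat.digitChar d]).getD 0 = (d : ℤ) := by
  interval_cases d <;> decide

lemma pv_digits_map (p : ℤ) (h : 0 < p) :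
    (PySem.Int.toChars p).map (fun c => (PySem.Int.ofChars? [c]).getD 0)
      = ((Nat.digits 10 p.toNat).map (fun d : ℕ => (d : ℤ))).reverse := by
  rw [pv_toChars_pos p h, List.map_reverse, List.map_map]
  congr 1
  apply List.map_congr_left
  intro d hd
  exact pv_ofChars_digitChar d (Nat.digits_lt_base (by norm_num) hd)

lemma pv_test_iff (S : List Int) (p : ℤ) (h : 0 < p) :
    (PySem.Set.equal
      (PySem.Set.ofList ((PySem.Int.toChars p).map (fun c => (PySem.Int.ofChars? [c]).getD 0)))
      (PySem.Set.ofList S) = true)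
      ↔ pvDS p.toNat = S.toFinset := by
  rw [PySem.Set.equal_iff, pv_digits_map p h]
  constructor
  · intro hx
    ext x
    have := hx x
    simp only [PySem.Set.mem_ofList, List.mem_reverse] at this
    simpa [pvDS] using this
  · intro hx x
    have := Finset.ext_iff.mp hx x
    simp only [PySem.Set.mem_ofList, List.mem_reverse]
    simpa [pvDS] using this

lemma pv_countP_range (M : ℕ) (q : ℕ → Bool) :
    ((List.range M).countP q : ℤ) = ∑ j ∈ Finset.range M, if q j then (1 : ℤ) else 0 := by
  induction M with
  | zero => simp
  | succ M ih =>
    rw [List.range_succ, List.countP_append, Finset.sum_range_succ, ← ih]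
    push_cast [List.countP_cons]
    by_cases h : q M <;> simp [h]

lemma pv_A_eq (S : List Int) (k : ℤ) (hk : 0 ≤ k) :
    Rpc S k = (pvE k.toNat S.toFinset : ℤ) := by
  unfold Rpc
  rw [PySem.List.foldl_count_if
        (p := fun p : ℤ => PySem.Set.equal
          (PySem.Set.ofList ((PySem.Int.toChars p).map (fun c => (PySem.Int.ofChars? [c]).getD 0)))
          (PySem.Set.ofList S))]
  rw [zero_add, PySem.List.pyRange_one, List.countP_map]
  set n := k.toNat
  have hcast : (10 : ℤ) ^ n = ((10 ^ n : ℕ) : ℤ) := by push_cast; ring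
  have hM : ((10 : ℤ) ^ n - 1).toNat = 10 ^ n - 1 := by
    have h1 : 1 ≤ (10 : ℕ) ^ n := Nat.one_le_pow _ _ (by norm_num)
    omega
  rw [hM]
  have hQ : List.countP
      ((fun p : ℤ => PySem.Set.equal
          (PySem.Set.ofList ((PySem.Int.toChars p).map (fun c => (PySem.Int.ofChars? [c]).getD 0)))
          (PySem.Set.ofList S)) ∘ (fun j : ℕ => (1 : ℤ) + j)) (List.range (10 ^ n - 1))
      = List.countP (fun j : ℕ => decide (pvDS (1 + j) = S.toFinset)) (List.range (10 ^ n - 1)) := by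
    apply List.countP_congr
    intro j _
    have hp : (0 : ℤ) < 1 + (j : ℤ) := by omega
    have h1 : ((1 : ℤ) + (j : ℤ)).toNat = 1 + j := by omega
    simp only [Function.comp_apply]
    rw [pv_test_iff S _ hp, h1, decide_eq_true_eq]
  rw [hQ, pv_countP_range]
  unfold pvE
  rw [Finset.card_filter, Nat.cast_sum, Finset.sum_Ico_eq_sum_range]
  apply Finset.sum_congr rfl
  intro j _
  simp

lemma pv_partition (n : ℕ) (U : Finset ℤ) :
    (pvW n U : ℤ) = ∑ V ∈ U.powerset, (pvE n V : ℤ) := by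
  rw [← Nat.cast_sum]
  congr 1
  unfold pvW pvE
  simp only [Finset.card_filter]
  rw [Finset.sum_comm]
  apply Finset.sum_congr rfl
  intro m _
  rw [Finset.sum_ite_eq U.powerset (pvDS m) (fun _ => (1 : ℕ))]
  simp [Finset.mem_powerset]

lemma pv_moebius (T : Finset ℤ) (g : Finset ℤ → ℤ) :
    ∑ U ∈ T.powerset, (-1 : ℤ) ^ (T.card - U.card) * (∑ V ∈ U.powerset, g V) = g T := by
  induction T using Finset.induction_on generalizing g with
  | empty => simp
  | @insert a s ha ih =>
    have hcard : (insert a s).card = s.card + 1 := Finset.card_insert_of_notMem ha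
    have hdisj : Disjoint s.powerset (s.powerset.image (insert a)) := by
      rw [Finset.disjoint_left]
      intro U hU hU'
      obtain ⟨V, hV, hVU⟩ := Finset.mem_image.mp hU'
      have haU : a ∉ U := fun hmem => ha ((Finset.mem_powerset.mp hU) hmem)
      exact haU (hVU ▸ Finset.mem_insert_self a V)
    have hinj : Set.InjOn (insert a) (↑s.powerset : Set (Finset ℤ)) := by
      intro x hx y hy hxy
      have hax : a ∉ x := fun hmem => ha (Finset.mem_powerset.mp (Finset.mem_coe.mp hx) hmem)
      have hay : a ∉ y := fun hmem => ha (Finset.mem_powerset.mp (Finset.mem_coe.mp hy) hmem)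
      rw [← Finset.erase_insert hax, ← Finset.erase_insert hay, hxy]
    rw [Finset.powerset_insert, Finset.sum_union hdisj, Finset.sum_image hinj,
        ← Finset.sum_add_distrib]
    have hstep : ∀ U ∈ s.powerset,
        (-1 : ℤ) ^ ((insert a s).card - U.card) * (∑ V ∈ U.powerset, g V)
          + (-1 : ℤ) ^ ((insert a s).card - (insert a U).card) * (∑ V ∈ (insert a U).powerset, g V)
        = (-1 : ℤ) ^ (s.card - U.card) * ∑ V ∈ U.powerset, g (insert a V) := by
      intro U hU
      have hUs : U ⊆ s := Finset.mem_powerset.mp hU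
      have haU : a ∉ U := fun hmem => ha (hUs hmem)
      have hc : U.card ≤ s.card := Finset.card_le_card hUs
      have h1 : (insert a s).card - U.card = (s.card - U.card) + 1 := by
        rw [hcard]; omega
      have h2 : (insert a s).card - (insert a U).card = s.card - U.card := by
        rw [hcard, Finset.card_insert_of_notMem haU]; omega
      have hdisjU : Disjoint U.powerset (U.powerset.image (insert a)) := by
        rw [Finset.disjoint_left]
        intro X hX hX'
        obtain ⟨Y, hY, hYX⟩ := Finset.mem_image.mp hX'
        have haX : a ∉ X := fun hmem => haU ((Finset.mem_powerset.mp hX) hmem)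
        exact haX (hYX ▸ Finset.mem_insert_self a Y)
      have hinjU : Set.InjOn (insert a) (↑U.powerset : Set (Finset ℤ)) := by
        intro x hx y hy hxy
        have hax : a ∉ x := fun hmem => haU (Finset.mem_powerset.mp (Finset.mem_coe.mp hx) hmem)
        have hay : a ∉ y := fun hmem => haU (Finset.mem_powerset.mp (Finset.mem_coe.mp hy) hmem)
        rw [← Finset.erase_insert hax, ← Finset.erase_insert hay, hxy]
      have h3 : (∑ V ∈ (insert a U).powerset, g V)
          = (∑ V ∈ U.powerset, g V) + ∑ V ∈ U.powerset, g (insert a V) := by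
        rw [Finset.powerset_insert, Finset.sum_union hdisjU, Finset.sum_image hinjU]
      rw [h1, h2, h3, pow_succ]
      ring
    rw [Finset.sum_congr rfl hstep, ih (fun V => g (insert a V))]

lemma pv_E_eq (n : ℕ) (T : Finset ℤ) :
    (pvE n T : ℤ) = ∑ U ∈ T.powerset, (-1 : ℤ) ^ (T.card - U.card) * (pvW n U : ℤ) := by
  conv_lhs => rw [← pv_moebius T (fun V => (pvE n V : ℤ))]
  exact Finset.sum_congr rfl (fun U _ => by rw [pv_partition])

lemma pv_DS_single (m : ℕ) (h1 : 0 < m) (h2 : m < 10) : pvDS m = {(m : ℤ)} := by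
  unfold pvDS
  rw [Nat.digits_def' (by norm_num : 1 < 10) h1]
  have hdiv : m / 10 = 0 := Nat.div_eq_of_lt h2
  have hmod : m % 10 = m := Nat.mod_eq_of_lt h2
  simp [hdiv, hmod]

lemma pv_DS_step (m : ℕ) (h : 10 ≤ m) :
    pvDS m = insert ((m % 10 : ℕ) : ℤ) (pvDS (m / 10)) := by
  unfold pvDS
  rw [Nat.digits_def' (by norm_num : 1 < 10) (by omega)]
  simp

lemma pv_W_succ (n : ℕ) (U : Finset ℤ) (hU : ∀ d ∈ U, 0 ≤ d ∧ d < 10) :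
    pvW (n + 1) U = (U.erase 0).card + U.card * pvW n U := by
  unfold pvW
  have h10 : (10 : ℕ) ≤ 10 ^ (n + 1) := by
    calc (10 : ℕ) = 10 ^ 1 := (pow_one 10).symm
    _ ≤ 10 ^ (n + 1) := Nat.pow_le_pow_right (by norm_num) (by omega)
  rw [← Finset.Ico_union_Ico_eq_Ico (by norm_num : (1:ℕ) ≤ 10) h10, Finset.filter_union,
      Finset.card_union_of_disjoint
        (Finset.disjoint_filter_filter (Finset.Ico_disjoint_Ico_consecutive 1 10 _))]
  congr 1
  · -- one-digit numbers: bijective with U.erase 0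
    refine Finset.card_bij' (fun m _ => (m : ℤ)) (fun d _ => d.toNat) ?_ ?_ ?_ ?_
    · intro m hm
      obtain ⟨hmem, hsub⟩ := Finset.mem_filter.mp hm
      obtain ⟨hm1, hm2⟩ := Finset.mem_Ico.mp hmem
      rw [pv_DS_single m hm1 hm2, Finset.singleton_subset_iff] at hsub
      show (m : ℤ) ∈ U.erase 0
      exact Finset.mem_erase.mpr ⟨by omega, hsub⟩
    · intro d hd
      obtain ⟨hd0, hdU⟩ := Finset.mem_erase.mp hd
      obtain ⟨hge, hlt⟩ := hU d hdU
      have hdpos : 0 < d := lt_of_le_of_ne hge (Ne.symm hd0)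
      have hcast : ((d.toNat : ℕ) : ℤ) = d := Int.toNat_of_nonneg hge
      show d.toNat ∈ (Finset.Ico 1 10).filter (fun m => pvDS m ⊆ U)
      refine Finset.mem_filter.mpr ⟨Finset.mem_Ico.mpr ⟨by omega, by omega⟩, ?_⟩
      rw [pv_DS_single d.toNat (by omega) (by omega), hcast, Finset.singleton_subset_iff]
      exact hdU
    · intro m hm
      obtain ⟨hmem, _⟩ := Finset.mem_filter.mp hm
      obtain ⟨hm1, hm2⟩ := Finset.mem_Ico.mp hmem
      show ((m : ℤ)).toNat = m
      omega
    · intro d hd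
      obtain ⟨_, hdU⟩ := Finset.mem_erase.mp hd
      show ((d.toNat : ℕ) : ℤ) = d
      exact Int.toNat_of_nonneg (hU d hdU).1
  · -- longer numbers: bijective with U ×ˢ (numbers with one digit fewer allowed)
    rw [← Finset.card_product U ((Finset.Ico 1 (10 ^ n)).filter (fun q => pvDS q ⊆ U))]
    refine Finset.card_bij'
      (fun m _ => (((m % 10 : ℕ) : ℤ), m / 10))
      (fun p _ => 10 * p.2 + p.1.toNat) ?_ ?_ ?_ ?_
    · intro m hm
      obtain ⟨hmem, hsub⟩ := Finset.mem_filter.mp hm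
      obtain ⟨hm1, hm2⟩ := Finset.mem_Ico.mp hmem
      rw [pv_DS_step m hm1, Finset.insert_subset_iff] at hsub
      show (((m % 10 : ℕ) : ℤ), m / 10) ∈ U ×ˢ ((Finset.Ico 1 (10 ^ n)).filter (fun q => pvDS q ⊆ U))
      refine Finset.mem_product.mpr ⟨hsub.1, Finset.mem_filter.mpr ⟨Finset.mem_Ico.mpr ⟨?_, ?_⟩, hsub.2⟩⟩
      · show 1 ≤ m / 10
        omega
      · show m / 10 < 10 ^ n
        rw [Nat.div_lt_iff_lt_mul (by norm_num)]
        calc m < 10 ^ (n + 1) := hm2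
        _ = 10 ^ n * 10 := by ring
    · intro p hp
      obtain ⟨hdU, hq⟩ := Finset.mem_product.mp hp
      obtain ⟨hqmem, hqsub⟩ := Finset.mem_filter.mp hq
      obtain ⟨hq1, hq2⟩ := Finset.mem_Ico.mp hqmem
      obtain ⟨hge, hlt⟩ := hU p.1 hdU
      have hcast : ((p.1.toNat : ℕ) : ℤ) = p.1 := Int.toNat_of_nonneg hge
      have hd9 : p.1.toNat < 10 := by omega
      have hm10 : 10 ≤ 10 * p.2 + p.1.toNat := by omega
      have hmod : (10 * p.2 + p.1.toNat) % 10 = p.1.toNat := by omega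
      have hdiv : (10 * p.2 + p.1.toNat) / 10 = p.2 := by omega
      show 10 * p.2 + p.1.toNat ∈ (Finset.Ico 10 (10 ^ (n + 1))).filter (fun m => pvDS m ⊆ U)
      refine Finset.mem_filter.mpr ⟨Finset.mem_Ico.mpr ⟨by omega, ?_⟩, ?_⟩
      · calc 10 * p.2 + p.1.toNat < 10 * (p.2 + 1) := by omega
        _ ≤ 10 * 10 ^ n := by omega
        _ = 10 ^ (n + 1) := by ring
      · rw [pv_DS_step _ hm10, hmod, hdiv, hcast, Finset.insert_subset_iff]
        exact ⟨hdU, hqsub⟩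
    · intro m hm
      obtain ⟨hmem, _⟩ := Finset.mem_filter.mp hm
      show 10 * (m / 10) + (((m % 10 : ℕ) : ℤ)).toNat = m
      omega
    · intro p hp
      obtain ⟨hdU, hq⟩ := Finset.mem_product.mp hp
      obtain ⟨hqmem, _⟩ := Finset.mem_filter.mp hq
      obtain ⟨hq1, _⟩ := Finset.mem_Ico.mp hqmem
      obtain ⟨hge, hlt⟩ := hU p.1 hdU
      have hcast : ((p.1.toNat : ℕ) : ℤ) = p.1 := Int.toNat_of_nonneg hge
      have hd9 : p.1.toNat < 10 := by omega
      have hmod : (10 * p.2 + p.1.toNat) % 10 = p.1.toNat := by omega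
      have hdiv : (10 * p.2 + p.1.toNat) / 10 = p.2 := by omega
      show (((((10 * p.2 + p.1.toNat) % 10 : ℕ)) : ℤ), (10 * p.2 + p.1.toNat) / 10) = p
      rw [hmod, hdiv, hcast]

lemma pv_W_closed (n : ℕ) (U : Finset ℤ) (hU : ∀ d ∈ U, 0 ≤ d ∧ d < 10) :
    (pvW n U : ℤ) = ((U.erase 0).card : ℤ) * ∑ j ∈ Finset.range n, (U.card : ℤ) ^ j := by
  induction n with
  | zero => simp [pvW]
  | succ n ih =>
    rw [pv_W_succ n U hU]
    push_cast
    rw [ih]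
    have h2 : ∑ j ∈ Finset.range (n + 1), (U.card : ℤ) ^ j
        = 1 + (U.card : ℤ) * ∑ j ∈ Finset.range n, (U.card : ℤ) ^ j := by
      rw [Finset.sum_range_succ', pow_zero, Finset.mul_sum, add_comm]
      congr 1
      exact Finset.sum_congr rfl (fun j _ => by ring)
    rw [h2]
    ring

-- B-side: the subset enumeration loop
def pvSubs (l : List ℤ) : List (List ℤ) :=
  l.foldl (fun subs d => subs ++ subs.map (fun u => u ++ [d])) [[]]

lemma pvSubs_append (l : List ℤ) (d : ℤ) :
    pvSubs (l ++ [d]) = pvSubs l ++ (pvSubs l).map (fun u => u ++ [d]) := by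
  simp [pvSubs, List.foldl_append]

lemma pv_mem_subs_sublist (l : List ℤ) : ∀ U ∈ pvSubs l, U.Sublist l := by
  induction l using List.reverseRecOn with
  | nil =>
    intro U hU
    simp only [pvSubs, List.foldl_nil, List.mem_singleton] at hU
    simp [hU]
  | append_singleton l d ih =>
    intro U hU
    rw [pvSubs_append] at hU
    rcases List.mem_append.mp hU with h | h
    · exact (ih U h).trans (List.sublist_append_left l [d])
    · obtain ⟨u, hu, rfl⟩ := List.mem_map.mp h
      exact List.Sublist.append (ih u hu) (List.Sublist.refl [d])

lemma pv_sum_subs (l : List ℤ) : ∀ (F : Finset ℤ → ℤ), l.Nodup →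
    ((pvSubs l).map (fun U => F U.toFinset)).sum = ∑ V ∈ l.toFinset.powerset, F V := by
  induction l using List.reverseRecOn with
  | nil => intro F _; simp [pvSubs]
  | append_singleton l d ih =>
    intro F hl
    have hd : d ∉ l := by
      intro hmem
      exact (List.disjoint_of_nodup_append hl) hmem (List.mem_singleton_self d)
    have hl' : l.Nodup := (List.nodup_append.mp hl).1
    rw [pvSubs_append, List.map_append, List.sum_append, List.map_map]
    have h2 : ((pvSubs l).map ((fun U => F U.toFinset) ∘ (fun u => u ++ [d]))).sum
        = ((pvSubs l).map (fun U => F (insert d U.toFinset))).sum := by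
      congr 1
      apply List.map_congr_left
      intro u _
      have : (u ++ [d]).toFinset = insert d u.toFinset := by
        ext x; simp
      simp [Function.comp, this]
    rw [h2, ih F hl', ih (fun V => F (insert d V)) hl']
    have h3 : (l ++ [d]).toFinset = insert d l.toFinset := by
      ext x; simp
    have hdF : d ∉ l.toFinset := fun hmem => hd (List.mem_toFinset.mp hmem)
    have hdisj : Disjoint l.toFinset.powerset (l.toFinset.powerset.image (insert d)) := by
      rw [Finset.disjoint_left]
      intro X hX hX'
      obtain ⟨Y, hY, hYX⟩ := Finset.mem_image.mp hX'
      have hdX : d ∉ X := fun hmem => hdF ((Finset.mem_powerset.mp hX) hmem)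
      exact hdX (hYX ▸ Finset.mem_insert_self d Y)
    have hinj : Set.InjOn (insert d) (↑l.toFinset.powerset : Set (Finset ℤ)) := by
      intro x hx y hy hxy
      have hax : d ∉ x := fun hmem => hdF (Finset.mem_powerset.mp (Finset.mem_coe.mp hx) hmem)
      have hay : d ∉ y := fun hmem => hdF (Finset.mem_powerset.mp (Finset.mem_coe.mp hy) hmem)
      rw [← Finset.erase_insert hax, ← Finset.erase_insert hay, hxy]
    rw [h3, Finset.powerset_insert, Finset.sum_union hdisj, Finset.sum_image hinj]

lemma pv_sum_list_range (f : ℕ → ℤ) (n : ℕ) :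
    ((List.range n).map f).sum = ∑ j ∈ Finset.range n, f j := by
  induction n with
  | zero => simp
  | succ n ih => simp [List.range_succ, Finset.sum_range_succ, ih]

lemma pv_geo_eq (k : ℤ) (u : ℕ) :
    pvGeo k u = ∑ j ∈ Finset.range ((k + 1 - 1).toNat), (u : ℤ) ^ j := by
  unfold pvGeo
  rw [PySem.List.foldl_add (g := fun L : ℤ => (u : Int) ^ ((L - 1).toNat)), zero_add,
      PySem.List.pyRange_one, List.map_map, ← pv_sum_list_range]
  congr 1
  apply List.map_congr_left
  intro j _
  simp [Function.comp]

lemma pv_card_erase (V : Finset ℤ) :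
    ((V.erase 0).card : ℤ) = (V.card : ℤ) - (if (0 : ℤ) ∈ V then 1 else 0) := by
  by_cases h : (0 : ℤ) ∈ V
  · rw [if_pos h, Finset.card_erase_of_mem h]
    have h1 : 1 ≤ V.card := Finset.card_pos.mpr ⟨0, h⟩
    omega
  · rw [if_neg h, Finset.erase_eq_self.mpr h]
    ring

-- ===== VERDICT (by name: the statement is the Claim_ definition above) =====
theorem Rpc_spec : Claim_equal_Rpc := by
  unfold Claim_equal_Rpc
  intro S k _ hpre
  unfold Pre_Rpc at hpre
  unfold Spec_Rpc
  rw [pv_A_eq S k hpre]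
  show _ = Rpc_alt S k
  unfold Rpc_alt
  set Tl := PySem.List.sorted (PySem.Set.ofList S) (fun x => x) false with hTl
  by_cases hbad : Tl.any (fun d => decide (d < 0) || decide (9 < d)) = true
  · rw [if_pos hbad]
    obtain ⟨d, hdTl, hd⟩ := List.any_eq_true.mp hbad
    have hdS : d ∈ S.toFinset := by
      rw [List.mem_toFinset]
      exact (PySem.Set.mem_ofList S d).mp
        ((PySem.List.mem_sorted (PySem.Set.ofList S) (fun x => x) false d).mp hdTl)
    have hout : d < 0 ∨ 9 < d := by simpa using hd
    have hE : pvE k.toNat S.toFinset = 0 := by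
      unfold pvE
      rw [Finset.card_eq_zero, Finset.filter_eq_empty_iff]
      intro m _ hEq
      have hdm : d ∈ pvDS m := hEq ▸ hdS
      have hex : ∃ dd ∈ Nat.digits 10 m, ((dd : ℤ)) = d := by
        simpa [pvDS] using hdm
      obtain ⟨dd, hdd, hcast⟩ := hex
      have := Nat.digits_lt_base (by norm_num : 1 < 10) hdd
      omega
    rw [hE]
    simp
  · rw [if_neg hbad]
    have hgood : ∀ d ∈ Tl, 0 ≤ d ∧ d < 10 := by
      intro d hd
      by_contra hcon
      apply hbad
      rw [List.any_eq_true]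
      refine ⟨d, hd, ?_⟩
      simp only [Bool.or_eq_true, decide_eq_true_eq]
      omega
    have hNodupTl : Tl.Nodup :=
      ((PySem.List.sorted_perm (PySem.Set.ofList S) (fun x => x) false).nodup_iff).mpr
        (PySem.Set.nodup_ofList S)
    have hTS : Tl.toFinset = S.toFinset := by
      ext x
      simp [List.mem_toFinset, hTl, PySem.List.mem_sorted, PySem.Set.mem_ofList]
    have ht : Tl.length = S.toFinset.card := by
      rw [← hTS, List.toFinset_card_of_nodup hNodupTl]
    change _ = (pvSubs Tl).foldl
      (fun (total : Int) (U : List Int) => total +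
        ((-1 : ℤ) ^ (Tl.length - U.length) * ((U.length : ℤ) - if (0 : ℤ) ∈ U then 1 else 0))
          * pvGeo k U.length) 0
    rw [PySem.List.foldl_add
      (g := fun U : List Int =>
        ((-1 : ℤ) ^ (Tl.length - U.length) * ((U.length : ℤ) - if (0 : ℤ) ∈ U then 1 else 0))
          * pvGeo k U.length), zero_add]
    have hmap : (pvSubs Tl).map
        (fun U : List Int =>
          ((-1 : ℤ) ^ (Tl.length - U.length) * ((U.length : ℤ) - if (0 : ℤ) ∈ U then 1 else 0))
            * pvGeo k U.length)
        = (pvSubs Tl).map (fun U : List Int =>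
          (fun V : Finset ℤ =>
            ((-1 : ℤ) ^ (S.toFinset.card - V.card) * ((V.card : ℤ) - if (0 : ℤ) ∈ V then 1 else 0))
              * pvGeo k V.card) U.toFinset) := by
      apply List.map_congr_left
      intro U hUmem
      have hsub : U.Sublist Tl := pv_mem_subs_sublist Tl U hUmem
      have hUnodup : U.Nodup := hsub.nodup hNodupTl
      have hcard : U.toFinset.card = U.length := List.toFinset_card_of_nodup hUnodup
      have hmem : ((0 : ℤ) ∈ U.toFinset) = ((0 : ℤ) ∈ U) := by
        simp [List.mem_toFinset]
      simp only [hcard, hmem, ht]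
    rw [hmap, pv_sum_subs Tl
      (fun V : Finset ℤ =>
        ((-1 : ℤ) ^ (S.toFinset.card - V.card) * ((V.card : ℤ) - if (0 : ℤ) ∈ V then 1 else 0))
          * pvGeo k V.card) hNodupTl, hTS]
    rw [pv_E_eq]
    apply Finset.sum_congr rfl
    intro U hUpow
    have hUsub : U ⊆ S.toFinset := Finset.mem_powerset.mp hUpow
    have hUdig : ∀ d ∈ U, 0 ≤ d ∧ d < 10 := by
      intro d hdU
      apply hgood
      have : d ∈ S.toFinset := hUsub hdU
      rw [← hTS, List.mem_toFinset] at this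
      exact this
    rw [pv_W_closed k.toNat U hUdig, pv_geo_eq, pv_card_erase]
    have hidx : (k + 1 - 1).toNat = k.toNat := by omega
    rw [hidx]
    ring
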